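-- pv_equiv track=rewrite | github.com/allkon14/algo-trainings | тренировки по алгоритмам 1/Множества/Реализация множества.py | wordsindict
-- ===== SOURCE A (Python) =====
-- def wordsindict(dictionary, text):
--     goodwords = set(dictionary)
--     for word in dictionary:
--         for delpos in range(len(word)):
--             goodwords.add(word[:delpos] + word[delpos + 1:])
--     ans = []
--     for word in text:
--         ans.append(word in goodwords)
--     return ans
-- ===== SOURCE B (Python) =====
-- def wordsindict(dictionary, text):
--     def matches(tw, dw):
--         # exact word, or tw is dw with exactly one character deleted
--         if tw == dw:
--             return True
--         if len(tw) + 1 != len(dw):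
--             return False
--         i = 0
--         while i < len(tw) and tw[i] == dw[i]:
--             i += 1
--         # skip the first mismatching character of dw and compare the rest
--         return tw[i:] == dw[i + 1:]
--     return [any(matches(w, d) for d in dictionary) for w in text]
-- ===== Notes on version B (the rewrite author's own statement) =====
-- stated objective: alternative
-- what changed: Instead of precomputing a set of every dictionary word and all its one-character-deletion variants and testing membership, B scans the dictionary per text word and decides each pair directly with a two-pointer skip-first-mismatch check (no variant strings are ever generated).
import Mathlib
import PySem

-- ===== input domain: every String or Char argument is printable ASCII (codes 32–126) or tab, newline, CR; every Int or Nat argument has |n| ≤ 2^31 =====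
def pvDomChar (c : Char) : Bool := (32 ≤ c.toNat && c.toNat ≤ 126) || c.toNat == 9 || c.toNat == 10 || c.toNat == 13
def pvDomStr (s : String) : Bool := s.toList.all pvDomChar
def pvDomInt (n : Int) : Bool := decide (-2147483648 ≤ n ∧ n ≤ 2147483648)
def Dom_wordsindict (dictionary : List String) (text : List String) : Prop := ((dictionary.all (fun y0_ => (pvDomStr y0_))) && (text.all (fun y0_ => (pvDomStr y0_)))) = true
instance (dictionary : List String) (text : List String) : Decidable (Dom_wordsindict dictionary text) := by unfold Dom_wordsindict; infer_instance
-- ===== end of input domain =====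

-- B replaces A's precomputed set of all one-deletion variants with a per-text-word scan of the
-- dictionary using a two-pointer skip-first-mismatch check; same return value, no speed claim.

-- ===== PORT A =====
def wordsindict (dictionary : List String) (text : List String) : List Bool :=
  let goodwords : PySem.Set String :=
    dictionary.foldl (fun gw word =>
      (PySem.List.pyRange 0 (PySem.Str.len word) 1).foldl
        (fun gw delpos =>
          PySem.Set.add gw (PySem.Str.slice word none (some delpos) ++
                            PySem.Str.slice word (some (delpos + 1)) none)) gw)
      (PySem.Set.ofList dictionary)
  text.foldl (fun ans word => ans ++ [PySem.Set.contains goodwords word]) []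

-- ===== PORT B =====
-- the 'while i < len(tw) and tw[i] == dw[i]' loop of Source B, as recursion on the two char lists;
-- at the first mismatch (or end of tw) it compares the rest of tw with dw after skipping one char
def skipDel : List Char → List Char → Bool
  | _, [] => false
  | [], _ :: d => d == []
  | x :: t, y :: d => if x == y then skipDel t d else (x :: t) == d

def matchesDel (tw dw : String) : Bool :=
  if tw == dw then true
  else if tw.toList.length + 1 == dw.toList.length then skipDel tw.toList dw.toList
  else false

def wordsindict_alt (dictionary : List String) (text : List String) : List Bool :=
  text.map (fun w => dictionary.any (fun d => matchesDel w d))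

-- ===== PRECONDITION & SPEC =====
def Spec_wordsindict (dictionary : List String) (text : List String) (out : List Bool) : Prop := out = wordsindict_alt dictionary text
instance (dictionary : List String) (text : List String) (out : List Bool) : Decidable (Spec_wordsindict dictionary text out) := by unfold Spec_wordsindict; infer_instance

-- ===== CLAIM (what is proved, stated in full; the proofs are below) =====
def Claim_equal_wordsindict : Prop := ∀ (dictionary : List String) (text : List String), Dom_wordsindict dictionary text → Spec_wordsindict dictionary text (wordsindict dictionary text)

-- ===== LEMMAS AND PROOFS =====

-- the two-pointer skip check accepts exactly the one-deletion relations (under the length guard)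
theorem skipDel_iff (d t : List Char) (h : t.length + 1 = d.length) :
    skipDel t d = true ↔ ∃ i < d.length, d.eraseIdx i = t := by
  induction d generalizing t with
  | nil => simp at h
  | cons y d ih =>
    cases t with
    | nil =>
      cases d with
      | nil => simp [skipDel]
      | cons z d => simp at h
    | cons x t =>
      simp only [List.length_cons] at h
      by_cases hxy : x = y
      · subst hxy
        simp only [skipDel, BEq.rfl, if_true]
        rw [ih t (by omega)]
        constructor
        · rintro ⟨i, hi, he⟩
          exact ⟨i + 1, by simpa using hi, by simp [List.eraseIdx, he]⟩
        · rintro ⟨i, hi, he⟩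
          cases i with
          | zero =>
            simp only [List.eraseIdx_cons_zero] at he
            exact ⟨0, by simp [he], by simp [he]⟩
          | succ j =>
            simp only [List.eraseIdx_cons_succ, List.cons.injEq, true_and] at he
            exact ⟨j, by simpa using hi, he⟩
      · simp only [skipDel]
        rw [if_neg (show ¬ (x == y) = true by simp [hxy])]
        constructor
        · intro he
          exact ⟨0, by simp, by simpa [List.eraseIdx_cons_zero] using (beq_iff_eq.mp he).symm⟩
        · rintro ⟨i, hi, he⟩
          cases i with
          | zero =>
            simp only [List.eraseIdx_cons_zero] at he
            simp [he]
          | succ j =>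
            simp only [List.eraseIdx_cons_succ, List.cons.injEq] at he
            exact absurd he.1.symm hxy

-- matchesDel accepts exactly 'equal or one deletion of dw'
theorem matchesDel_iff (tw dw : String) :
    matchesDel tw dw = true ↔ tw = dw ∨ ∃ i < dw.toList.length, dw.toList.eraseIdx i = tw.toList := by
  by_cases he : tw = dw
  · simp [matchesDel, he]
  · unfold matchesDel
    rw [if_neg (show ¬ (tw == dw) = true by simp [he])]
    by_cases hl : tw.toList.length + 1 = dw.toList.length
    · rw [if_pos (show (tw.toList.length + 1 == dw.toList.length) = true by exact beq_iff_eq.mpr hl),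
        skipDel_iff dw.toList tw.toList hl]
      constructor
      · exact fun h => Or.inr h
      · rintro (h | h)
        · exact absurd h he
        · exact h
    · rw [if_neg (show ¬ (tw.toList.length + 1 == dw.toList.length) = true by simp only [beq_iff_eq]; exact hl)]
      constructor
      · simp
      · rintro (h | ⟨i, hi, hdel⟩)
        · exact absurd h he
        · exact absurd (by rw [← hdel, List.length_eraseIdx_of_lt hi]; omega) hl

-- membership in a nested "add f(word,i) for every word, for every i" fold
theorem mem_double_foldl {α β : Type} [BEq β] [LawfulBEq β]
    (l : List α) (g : α → List Int) (f : α → Int → β) (s : PySem.Set β) (w : β) :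
    w ∈ l.foldl (fun gw a => (g a).foldl (fun gw i => PySem.Set.add gw (f a i)) gw) s ↔
      w ∈ s ∨ ∃ a ∈ l, ∃ i ∈ g a, w = f a i := by
  induction l generalizing s with
  | nil => simp
  | cons a l ih =>
    simp only [List.foldl_cons, ih, PySem.Set.mem_foldl_add, List.mem_cons]
    constructor
    · rintro ((h | ⟨i, hi, hf⟩) | ⟨b, hb, hq⟩)
      · exact Or.inl h
      · exact Or.inr ⟨a, Or.inl rfl, i, hi, hf⟩
      · exact Or.inr ⟨b, Or.inr hb, hq⟩
    · rintro (h | ⟨b, (rfl | hb), i, hi, hf⟩)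
      · exact Or.inl (Or.inl h)
      · exact Or.inl (Or.inr ⟨i, hi, hf⟩)
      · exact Or.inr ⟨b, hb, i, hi, hf⟩

-- the string A adds for word and delpos IS the one-deletion at delpos (as char lists)
theorem delString_toList (word : String) (i : Int) (h0 : 0 ≤ i) (_hlen : i < (word.toList.length : Int)) :
    (PySem.Str.slice word none (some i) ++ PySem.Str.slice word (some (i + 1)) none).toList
      = word.toList.eraseIdx i.toNat := by
  rw [List.eraseIdx_eq_take_drop_succ]
  simp only [String.toList_append, PySem.Str.toList_slice, PySem.Chars.slice_eq_listSlice]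
  rw [PySem.List.slice_to word.toList h0, PySem.List.slice_from word.toList (by omega : (0:Int) ≤ i + 1)]
  have : (i + 1).toNat = i.toNat + 1 := by omega
  rw [this]

-- per word: A's membership test equals B's dictionary scan
theorem perword (dictionary : List String) (w : String) :
    PySem.Set.contains
      (dictionary.foldl (fun gw word =>
        (PySem.List.pyRange 0 (PySem.Str.len word) 1).foldl
          (fun gw delpos =>
            PySem.Set.add gw (PySem.Str.slice word none (some delpos) ++
                              PySem.Str.slice word (some (delpos + 1)) none)) gw)
        (PySem.Set.ofList dictionary)) w
      = dictionary.any (fun d => matchesDel w d) := by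
  rw [Bool.eq_iff_iff, PySem.Set.contains_iff,
    mem_double_foldl dictionary (fun word => PySem.List.pyRange 0 (PySem.Str.len word) 1)
      (fun word delpos => PySem.Str.slice word none (some delpos) ++
                          PySem.Str.slice word (some (delpos + 1)) none)
      (PySem.Set.ofList dictionary) w]
  simp only [PySem.Set.mem_ofList, List.any_eq_true, matchesDel_iff, PySem.List.mem_pyRange_one,
    PySem.Str.len_eq]
  constructor
  · rintro (hw | ⟨d, hd, i, ⟨h0, hi⟩, rfl⟩)
    · exact ⟨w, hw, Or.inl rfl⟩
    · exact ⟨d, hd, Or.inr ⟨i.toNat, by omega, (delString_toList d i h0 hi).symm⟩⟩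
  · rintro ⟨d, hd, rfl | ⟨i, hi, hdel⟩⟩
    · exact Or.inl hd
    · refine Or.inr ⟨d, hd, (i : Int), ⟨by omega, by exact_mod_cast hi⟩,
        String.toList_injective ?_⟩
      rw [delString_toList d i (by omega) (by exact_mod_cast hi)]
      simpa using hdel.symm

-- ===== VERDICT (by name: the statement is the Claim_ definition above) =====
theorem wordsindict_spec : Claim_equal_wordsindict := by
  intro dictionary text _
  unfold Spec_wordsindict wordsindict wordsindict_alt
  rw [PySem.List.foldl_append_singleton_eq_map]
  exact List.map_congr_left (fun w _ => perword dictionary w)
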